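/-
  SSE ON THE FLAT USER MACHINE, PART 1: what every legacy-encoded SSE / SSE2 instruction body is made of.

  An SSE instruction body (X86/Insn/*.lean over X86/Sem/Lib/{Enable,Features,EncodingChecks,Simd,Float,VecOperands}.lean)
  is a sequence of library procedures. This file gives each procedure its rule over `Sem.wpUser`, for a LEGACY encoding
  (no VEX / EVEX prefix, no LOCK: `Legacy e`) on an Intel processor that enumerates SSE and SSE2 (`SseMicro μ` for the
  gates that ask the microarchitecture record, `User.Core.features` — model patch 0001 — for the gates that observe the
  machine), with all six SIMD floating-point exceptions masked (`SseOK u`).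

      Legacy e        the encoding facts the bodies branch on                   (decidable: `by decide` on a decoded literal)
      SseMicro μ      vendor = Intel (both spellings), CPUID.SSE, CPUID.SSE2     (to be folded into the proof's `MicroOK μ`)
      SseOK u         MXCSR[12:7] = 111111b: IM DM ZM OM UM PM all set          (an invariant: `SseOK.setFlags`)

  RULES. Procedures that only look at the encoding are EQUATIONS (`wpUser_checkNoLock`, `wpUser_maskingScalar`, …: simp
  rules). Procedures that observe the machine (`requireFeature`, `requireSse`, `in64`, `reportSimdFp` …) are IMPLICATIONS
  `continuation → wpUser … (procedure) Q E u`, used with `apply` after `wpUser_bind'` has split the `do` block: the flat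
  reading quantifies over every machine in the relation, and the facts `User.Abs` gives answer the observation.
-/
import UserX.Basic
namespace X86
namespace User

/-! ### The processor -/

/-- **What the SSE bodies ask of the microarchitecture record `μ`** (`vendor`, `X86.config` = `μ.cfg`): an Intel processor
that enumerates SSE and SSE2. The gates `requireFeatures` / `requireSimd` evaluate their CPUID expression on `μ.cfg`
(NOT on the machine's `cfg`, which `requireFeature` observes: `User.UserFeatures`); `Encoding.vecAttr` reads
`μ.cfg.vendor`; the bodies switch on `μ.vendor`. -/
structure SseMicro (μ : Microarch) : Prop where
  vendor : μ.vendor = .intel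
  cfgVendor : μ.cfg.vendor = .intel
  sse : μ.cfg.has Feature.sse = true
  sse2 : μ.cfg.has Feature.sse2 = true

/-- **A legacy encoding without LOCK**: what a decoded SSE / SSE2 instruction of a compiled program is. On a decoded
encoding literal both fields hold by `rfl`. -/
structure Legacy (e : Encoding) : Prop where
  form : e.form = .legacy
  lock : e.lock = false
  /-- no vector-length field: `Encoding.vlen` answers 128 -/
  ll : e.ll = 0

namespace Legacy
variable {e : Encoding}

theorem isEvex (h : Legacy e) : e.isEvex = false := by
  simp [Encoding.isEvex, h.form]

theorem isVex (h : Legacy e) : e.isVex = false := by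
  simp [Encoding.isVex, h.form]

theorem upper (h : Legacy e) : e.upper = .preserve := by
  simp [Encoding.upper, h.form]

theorem embeddedRounding (h : Legacy e) : e.embeddedRounding = false := by
  simp [Encoding.embeddedRounding, h.isEvex]

theorem form_ne (h : Legacy e) : (e.form != .legacy) = false := by
  simp [h.form]

theorem form_eq (h : Legacy e) : (e.form == .legacy) = true := by
  simp [h.form]

theorem form_evex (h : Legacy e) : (e.form == .evex) = false := by
  simp [h.form]

theorem effVlen (h : Legacy e) : e.effVlen = some .v128 := by
  simp [Encoding.effVlen, h.embeddedRounding, Encoding.vlen, h.ll]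

end Legacy

/-! ### MXCSR: every exception masked -/

/-- **All six SIMD floating-point exceptions are masked** (MXCSR.IM DM ZM OM UM PM, bits 7–12; SDM Vol. 1 §10.2.3). The
start machine has MXCSR = 1F80H and the program never writes MXCSR (no LDMXCSR / FXRSTOR / XRSTOR), so this is an
invariant of the run: an instruction only sets sticky flag bits 0–5 (`SseOK.setFlags`). -/
structure SseOK (u : State) : Prop where
  masks : u.mxcsr &&& 0x1F80 = 0x1F80

/-- Setting one sticky flag does not touch the mask bits. -/
theorem mxcsr_setFlag_masks (w : Word) (x : FpException) : MXCSR.setFlag w x &&& 0x1F80 = w &&& 0x1F80 := by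
  cases x <;>
    simp only [MXCSR.setFlag, MXCSR.flagBit, FpException.idx, Word.setBit, ge_iff_le, Nat.reduceLeDiff, if_false, if_true, UInt64.reduceOfNat] <;>
    bv_decide

/-- Setting sticky flags does not touch the mask bits. -/
theorem mxcsr_setFlags_masks (w : Word) (es : List FpException) : MXCSR.setFlags w es &&& 0x1F80 = w &&& 0x1F80 := by
  induction es generalizing w with
  | nil => rfl
  | cons x es ih =>
    rw [MXCSR.setFlags, ih, mxcsr_setFlag_masks]

/-- With every mask bit set, each exception is masked. -/
theorem mxcsr_masked_of_masks (w : Word) (h : w &&& 0x1F80 = 0x1F80) (x : FpException) : MXCSR.masked w x = true := by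
  cases x <;>
    simp only [MXCSR.masked, MXCSR.maskBit, FpException.idx, Word.bit, ge_iff_le, Nat.reduceAdd, Nat.reduceLeDiff, if_false, UInt64.reduceOfNat] <;>
    bv_decide

/-- With every mask bit set, no reported exception is unmasked: the `#XM` branch of `reportSimdFp` is dead. -/
theorem mxcsr_firstUnmasked_none (w : Word) (h : w &&& 0x1F80 = 0x1F80) (es : List FpException) :
    MXCSR.firstUnmasked w es = none := by
  unfold MXCSR.firstUnmasked
  rw [List.find?_eq_none]
  intro x _
  simp [mxcsr_masked_of_masks w h x]

/-- **The invariant is preserved by the generic flag-setting function.** -/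
theorem SseOK.setFlags {u : State} (h : SseOK u) (es : List FpException) :
    SseOK (u.setMxcsr (MXCSR.setFlags u.mxcsr es)) := by
  constructor
  show MXCSR.setFlags u.mxcsr es &&& 0x1F80 = 0x1F80
  rw [mxcsr_setFlags_masks, h.masks]

/-- The invariant looks at MXCSR only. -/
theorem SseOK.of_mxcsr {u u' : State} (h : SseOK u) (e : u'.mxcsr = u.mxcsr) : SseOK u' := by
  constructor
  rw [e]
  exact h.masks

end User

/-! ### Reads of the system registers the gates look at

`requireSse` reads CR0 and CR4 through their register views; the user state does not hold them, so the flat reading quantifies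
over the machines in the relation, and `User.Abs.cr0` / `cr4` say what they hold. -/

namespace Sem
open User

section
variable {α : Type} {L : Layout} {μ : Microarch} {Q : α → State → Prop} {E : Fault → State → Prop} {u : State}

/-- A read of CR0: the value `User.Core` pins (PG WP NE ET MP PE). -/
theorem wpUser_read_cr0 (k : Word → Sem α) (h : wpUser L μ (k 0x80010033) Q E u) :
    wpUser L μ (.readReg .cr0 k) Q E u := by
  rw [wpUser_readReg]
  intro m hm
  show wpUser L μ (k m.cr0) Q E u
  rw [hm.cr0]
  exact h

/-- A read of CR4: the value `User.Core` pins (OSXMMEXCPT OSFXSR PAE). -/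
theorem wpUser_read_cr4 (k : Word → Sem α) (h : wpUser L μ (k 0x620) Q E u) :
    wpUser L μ (.readReg .cr4 k) Q E u := by
  rw [wpUser_readReg]
  intro m hm
  show wpUser L μ (k m.cr4) Q E u
  rw [hm.cr4]
  exact h

end

/-! ### The availability gates -/

section
variable {L : Layout} {μ : Microarch} {Q : Unit → State → Prop} {E : Fault → State → Prop} {u : State}

/-- `requireFeature` of a bit every machine in the relation enumerates. -/
theorem wpUser_requireFeature_of (f : FeatureBit) (hf : ∀ m, Abs L m u → m.cfg.has f = true) (h : Q () u) :
    wpUser L μ (Insn.requireFeature f) Q E u := by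
  unfold Insn.requireFeature
  simp only [wpUser_bind', wpUser_observe, wpUser_require]
  intro m hm
  rw [hf m hm]
  exact h

/-- **CPUID.SSE** (model patch 0001: `User.Core.features`). -/
theorem wpUser_requireFeature_sse (h : Q () u) : wpUser L μ (Insn.requireFeature Feature.sse) Q E u :=
  wpUser_requireFeature_of _ (fun _ hm => hm.core.features.sse) h

/-- **CPUID.SSE2** (model patch 0001: `User.Core.features`). -/
theorem wpUser_requireFeature_sse2 (h : Q () u) : wpUser L μ (Insn.requireFeature Feature.sse2) Q E u :=
  wpUser_requireFeature_of _ (fun _ hm => hm.core.features.sse2) h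

/-- **The state gate of a legacy SSE instruction**: CR0.EM = 0, CR4.OSFXSR = 1, CR0.TS = 0 in every machine of the relation. -/
theorem wpUser_requireSse (h : Q () u) : wpUser L μ Insn.requireSse Q E u := by
  unfold Insn.requireSse
  simp only [wpUser_bind', wpUser_require, Sem.get]
  apply wpUser_read_cr0
  simp only [wpUser_pure]
  rw [if_pos (by decide)]
  apply wpUser_read_cr4
  simp only [wpUser_pure]
  rw [if_pos (by decide), if_pos (by decide)]
  exact h

/-- The CPUID gate on the static table of `μ`, for an expression that evaluates to `true` there. -/
theorem wpUser_requireFeatures (x : FeatureExpr) (hx : x.eval μ.cfg = true) (h : Q () u) :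
    wpUser L μ (Insn.requireFeatures x) Q E u := by
  unfold Insn.requireFeatures Insn.X86.config Insn.X86.require
  simp only [wpUser_bind', wpUser_askμ, wpUser_require, hx, if_true]
  exact h

/-- The CPUID bit `f` on the static table of `μ`. -/
theorem eval_bit (f : FeatureBit) : (FeatureExpr.bit f).eval μ.cfg = μ.cfg.has f := rfl

/-- CPUID gate, then state gate, of a legacy SSE instruction. -/
theorem wpUser_requireSimd_legacy (x : FeatureExpr) (hx : x.eval μ.cfg = true) (h : Q () u) :
    wpUser L μ (Insn.requireSimd .legacy x) Q E u := by
  unfold Insn.requireSimd Insn.requireSimdState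
  simp only [wpUser_bind']
  apply wpUser_requireFeatures x hx
  exact wpUser_requireSse h

end

/-! ### Encoding checks: equations (they look at nothing but the encoding) -/

section
variable {L : Layout} {μ : Microarch} {E : Fault → State → Prop} {u : State} {e : Encoding}

/-- No LOCK prefix. -/
theorem wpUser_checkNoLock {Q : Unit → State → Prop} (he : Legacy e) :
    wpUser L μ (Insn.Encoding.checkNoLock e) Q E u = Q () u := by
  unfold Insn.Encoding.checkNoLock
  simp only [wpUser_require, he.lock, Bool.not_false, if_true]

/-- A legacy encoding has no form-level `#UD` of the VEX / EVEX kind. -/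
theorem wpUser_checkFormCommon {Q : Unit → State → Prop} (he : Legacy e) :
    wpUser L μ (Insn.Encoding.checkFormCommon e) Q E u = Q () u := by
  unfold Insn.Encoding.checkFormCommon
  rw [he.form]
  rfl

/-- EVEX.b does not exist in a legacy encoding. -/
theorem wpUser_checkEvexB {Q : Unit → State → Prop} (he : Legacy e) (srcIsMem : Bool) (r : SimdMem) :
    wpUser L μ (Insn.Encoding.checkEvexB e srcIsMem r) Q E u = Q () u := by
  unfold Insn.Encoding.checkEvexB
  simp only [he.isEvex, Bool.false_and, Bool.false_eq_true, if_false, wpUser_pure']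

/-- EVEX.z does not exist in a legacy encoding (the check of a memory destination). -/
theorem wpUser_checkMemDest {Q : Unit → State → Prop} (he : Legacy e) :
    wpUser L μ (Insn.Encoding.checkMemDest e) Q E u = Q () u := by
  unfold Insn.Encoding.checkMemDest Insn.Encoding.checkKDest Insn.X86.require
  simp only [he.isEvex, Bool.false_and, Bool.not_false, wpUser_require, if_true]

/-- The vector length of a legacy encoding is 128 bits, where 128 is allowed. -/
theorem wpUser_requireVlen {Q : VWidth → State → Prop} (he : Legacy e) (allowed : List Nat)
    (ha : allowed.contains 128 = true) :
    wpUser L μ (Insn.Encoding.requireVlen e allowed) Q E u = Q .v128 u := by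
  unfold Insn.Encoding.requireVlen
  rw [he.effVlen]
  simp only [VWidth.bits, ha, if_true, wpUser_pure']

/-- **The masking context of a legacy scalar instruction**: one element, active, merging. -/
def scalarCtx (elemBits : Nat) : Masking :=
  { vl := .v128, elemBits := elemBits, kl := 1, k := 1, zeroing := false }

/-- **The masking context of a legacy packed instruction**: 128 bits, every element active, merging. -/
def packedCtx (elemBits countBits : Nat) : Masking :=
  { vl := .v128, elemBits := elemBits, kl := VWidth.v128.kl countBits,
    k := 0xFFFFFFFFFFFFFFFF &&& Word.mask (VWidth.v128.kl countBits), zeroing := false }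

theorem wpUser_maskingScalar {Q : Masking → State → Prop} (he : Legacy e) (elemBits : Nat) :
    wpUser L μ (Insn.Encoding.maskingScalar e elemBits) Q E u = Q (scalarCtx elemBits) u := by
  unfold Insn.Encoding.maskingScalar
  simp only [he.isEvex, Bool.false_eq_true, if_false, Bool.false_and, wpUser_bind', wpUser_pure']
  rfl

theorem wpUser_masking {Q : Masking → State → Prop} (he : Legacy e) (elemBits countBits : Nat) :
    wpUser L μ (Insn.Encoding.masking e elemBits countBits) Q E u = Q (packedCtx elemBits countBits) u := by
  unfold Insn.Encoding.masking
  simp only [he.effVlen, he.isEvex, Bool.false_eq_true, if_false, Bool.false_and, wpUser_bind', wpUser_pure']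
  rfl

/-- The vendor the bodies switch on. -/
theorem wpUser_vendor {Q : Vendor → State → Prop} : wpUser L μ Insn.vendor Q E u = Q μ.vendor u := by
  unfold Insn.vendor
  rw [wpUser_askμ]

end

/-! ### The preambles -/

section
variable {L : Layout} {μ : Microarch} {E : Fault → State → Prop} {u : State} {e : Encoding}

/-- **The preamble of a legacy scalar instruction** (`Encoding.simdEnterScalar`): no fault, the scalar masking context. -/
theorem wpUser_simdEnterScalar {Q : Masking → State → Prop} (he : Legacy e) (feat : FeatureExpr)
    (hf : feat.eval μ.cfg = true) (elemBits : Nat) (srcIsMem : Bool) (r : SimdMem) (h : Q (scalarCtx elemBits) u) :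
    wpUser L μ (Insn.Encoding.simdEnterScalar e feat elemBits srcIsMem r) Q E u := by
  unfold Insn.Encoding.simdEnterScalar
  simp only [wpUser_bind', wpUser_checkFormCommon he, he.form_eq, if_true, wpUser_checkNoLock he, wpUser_checkEvexB he,
    wpUser_maskingScalar he]
  rw [he.form]
  apply wpUser_requireSimd_legacy feat hf
  exact h

/-- **The preamble of a legacy packed instruction** (`Encoding.simdEnter`): no fault, the packed masking context. -/
theorem wpUser_simdEnter {Q : Masking → State → Prop} (he : Legacy e) (feat : VWidth → FeatureExpr)
    (hf : (feat .v128).eval μ.cfg = true) (elemBits : Nat) (srcIsMem : Bool) (r : SimdMem) (countBits : Nat)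
    (allowed : List Nat) (ha : allowed.contains 128 = true) (vu : Bool) (h : Q (packedCtx elemBits countBits) u) :
    wpUser L μ (Insn.Encoding.simdEnter e feat elemBits srcIsMem r countBits allowed vu) Q E u := by
  unfold Insn.Encoding.simdEnter
  simp only [wpUser_bind', wpUser_checkFormCommon he, he.form_eq, if_true, wpUser_checkNoLock he, wpUser_checkEvexB he,
    wpUser_requireVlen he allowed ha, wpUser_masking he]
  rw [he.form]
  apply wpUser_requireSimd_legacy _ hf
  exact h

end

/-! ### Floating-point controls and exception reporting -/

section
variable {L : Layout} {μ : Microarch} {E : Fault → State → Prop} {u : State} {e : Encoding}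

/-- **The controls of a legacy scalar / packed FP instruction**: MXCSR.RC, DAZ, FTZ, OM, UM; no SAE. -/
def fpCtlOf (w : Word) : FpCtl :=
  { rm := (MXCSR.roundMode w).toFP, daz := MXCSR.daz w, ftz := MXCSR.ftz w, sae := false,
    om := MXCSR.masked w .overflow, um := MXCSR.masked w .underflow }

theorem wpUser_fpCtl {Q : FpCtl → State → Prop} (he : Legacy e) (has : FpRounding) :
    wpUser L μ (Insn.fpCtl e has) Q E u = Q (fpCtlOf u.mxcsr) u := by
  unfold Insn.fpCtl
  simp only [Sem.get, wpUser_bind', wpUser_read_mxcsr, wpUser_pure, he.embeddedRounding, Bool.not_false, if_true,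
    wpUser_pure']
  rfl

/-- MXCSR after an instruction reported the flags `f`: the pre-computation exceptions, then the post-computation ones
(`reportSimdFlags`). Only sticky flag bits 0–5 can differ from `w`. -/
def mxcsrAfter (w : Word) (f : FP.Flags) : Word :=
  MXCSR.setFlags (MXCSR.setFlags w (fpPre f)) (fpPost f)

theorem mxcsrAfter_masks (w : Word) (f : FP.Flags) : mxcsrAfter w f &&& 0x1F80 = w &&& 0x1F80 := by
  unfold mxcsrAfter
  rw [mxcsr_setFlags_masks, mxcsr_setFlags_masks]

/-- **The invariant survives an FP instruction.** -/
theorem _root_.X86.User.SseOK.after (h : SseOK u) (f : FP.Flags) : SseOK (u.setMxcsr (mxcsrAfter u.mxcsr f)) := by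
  constructor
  show mxcsrAfter u.mxcsr f &&& 0x1F80 = 0x1F80
  rw [mxcsrAfter_masks, h.masks]

/-- **`reportSimdFp` with every exception masked**: the sticky flags are set, nothing is raised. (The procedure reads MXCSR
through its register view — a read of the user state, no machine is introduced — and CR4 only on the dead `#XM` branch.) -/
theorem wpUser_reportSimdFp {Q : Unit → State → Prop} (hs : SseOK u) (es : List FpException)
    (h : Q () (u.setMxcsr (MXCSR.setFlags u.mxcsr es))) : wpUser L μ (Insn.reportSimdFp es) Q E u := by
  unfold Insn.reportSimdFp
  cases hes : es.isEmpty with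
  | true =>
    have : es = [] := List.isEmpty_iff.mp hes
    subst this
    simp only [if_true, wpUser_pure']
    exact h
  | false =>
    simp only [Bool.false_eq_true, if_false, Sem.get, Sem.put, wpUser_bind', wpUser_read_mxcsr, wpUser_write_mxcsr,
      wpUser_pure, true_and]
    rw [mxcsr_firstUnmasked_none u.mxcsr hs.masks es]
    exact h

/-- **`reportSimdFlags` with every exception masked and no SAE**: MXCSR becomes `mxcsrAfter`, nothing is raised. -/
theorem wpUser_reportSimdFlags {Q : Unit → State → Prop} (hs : SseOK u) (ctl : FpCtl) (hc : ctl.sae = false) (f : FP.Flags)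
    (h : Q () (u.setMxcsr (mxcsrAfter u.mxcsr f))) : wpUser L μ (Insn.reportSimdFlags ctl f) Q E u := by
  unfold Insn.reportSimdFlags
  simp only [hc, Bool.false_eq_true, if_false, wpUser_bind']
  apply wpUser_reportSimdFp hs
  apply wpUser_reportSimdFp (hs.setFlags _)
  exact h

end

end Sem
end X86
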